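-- pv_equiv track=rewrite | github.com/ElevenMou/workers | services/social/tiktok.py | _select_privacy_level
-- ===== SOURCE A (Python) =====
-- def _select_privacy_level(privacy_options: list[str]) -> str:
--     normalized = [str(option).strip().upper() for option in privacy_options if str(option).strip()]
--     if not normalized:
--         return "SELF_ONLY"
--
--     # Prefer a visible post by default when the account allows it.
--     preference_order = [
--         "PUBLIC_TO_EVERYONE",
--         "MUTUAL_FOLLOW_FRIENDS",
--         "FOLLOWER_OF_CREATOR",
--         "SELF_ONLY",
--     ]
--     for candidate in preference_order:
--         if candidate in normalized:
--             return candidate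
--
--     return normalized[0]
-- ===== SOURCE B (Python) =====
-- def _select_privacy_level(privacy_options: list[str]) -> str:
--     normalized = [str(option).strip().upper() for option in privacy_options if str(option).strip()]
--     if not normalized:
--         return "SELF_ONLY"
--
--     ranks = {
--         "PUBLIC_TO_EVERYONE": 0,
--         "MUTUAL_FOLLOW_FRIENDS": 1,
--         "FOLLOWER_OF_CREATOR": 2,
--         "SELF_ONLY": 3,
--     }
--     best = None
--     for option in normalized:
--         rank = ranks.get(option)
--         if rank is not None and (best is None or rank < best[0]):
--             best = (rank, option)
--     return best[1] if best is not None else normalized[0]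
-- ===== Notes on version B (the rewrite author's own statement) =====
-- stated objective: alternative
-- what changed: Instead of scanning the fixed preference list and testing membership in the normalized input for each candidate, B scans the normalized input once, looking each option up in a rank table and keeping the option with the smallest rank.
import Mathlib
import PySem

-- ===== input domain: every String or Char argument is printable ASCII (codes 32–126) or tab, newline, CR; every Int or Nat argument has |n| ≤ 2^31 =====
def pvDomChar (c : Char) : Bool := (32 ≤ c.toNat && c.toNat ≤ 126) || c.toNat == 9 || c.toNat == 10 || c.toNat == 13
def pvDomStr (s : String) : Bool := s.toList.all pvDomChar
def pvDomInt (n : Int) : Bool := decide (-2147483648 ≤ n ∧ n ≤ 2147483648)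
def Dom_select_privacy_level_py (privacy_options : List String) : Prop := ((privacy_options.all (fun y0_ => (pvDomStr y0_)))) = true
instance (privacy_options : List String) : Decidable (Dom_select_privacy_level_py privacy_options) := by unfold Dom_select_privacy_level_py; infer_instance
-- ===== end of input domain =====

-- B replaces A's scan of the fixed preference list (membership test per candidate) with a single
-- pass over the normalized input that looks each option up in a rank table and keeps the
-- smallest-rank option; alternative decomposition, same result.


-- ===== PORT A =====
-- the comprehension [str(option).strip().upper() for option in privacy_options if str(option).strip()]
def pvNormalize (privacy_options : List String) : List String :=
  (privacy_options.filter (fun o => PySem.Str.strip o ≠ "")).map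
    (fun o => PySem.Str.upper (PySem.Str.strip o))

def pvPrefOrder : List String :=
  ["PUBLIC_TO_EVERYONE", "MUTUAL_FOLLOW_FRIENDS", "FOLLOWER_OF_CREATOR", "SELF_ONLY"]

-- the 'for candidate in preference_order' loop with the final 'return normalized[0]'
def pvAFind (cands : List String) (normalized : List String) : String :=
  match cands with
  | [] => normalized.headD ""      -- normalized[0]; normalized is nonempty at the call site
  | c :: rest => if c ∈ normalized then c else pvAFind rest normalized

def select_privacy_level_py (privacy_options : List String) : String :=
  let normalized := pvNormalize privacy_options
  if normalized.isEmpty then "SELF_ONLY"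
  else pvAFind pvPrefOrder normalized

-- ===== PORT B =====
def pvRanks : PySem.Dict String Int :=
  PySem.Dict.ofList
    [("PUBLIC_TO_EVERYONE", 0), ("MUTUAL_FOLLOW_FRIENDS", 1),
     ("FOLLOWER_OF_CREATOR", 2), ("SELF_ONLY", 3)]

-- one step of B's 'for option in normalized' loop
def pvBStep (best : Option (Int × String)) (option : String) : Option (Int × String) :=
  match pvRanks.get? option with
  | some rank =>
    match best with
    | none => some (rank, option)
    | some b => if rank < b.1 then some (rank, option) else best
  | none => best

def select_privacy_level_py_alt (privacy_options : List String) : String :=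
  let normalized := pvNormalize privacy_options
  if normalized.isEmpty then "SELF_ONLY"
  else
    let best := normalized.foldl pvBStep none
    match best with
    | some b => b.2
    | none => normalized.headD ""      -- normalized[0]

-- ===== PRECONDITION & SPEC =====
def Spec_select_privacy_level_py (privacy_options : List String) (out : String) : Prop := out = select_privacy_level_py_alt privacy_options
instance (privacy_options : List String) (out : String) : Decidable (Spec_select_privacy_level_py privacy_options out) := by unfold Spec_select_privacy_level_py; infer_instance

-- ===== CLAIM (what is proved, stated in full; the proofs are below) =====
def Claim_equal_select_privacy_level_py : Prop := ∀ (privacy_options : List String), Dom_select_privacy_level_py privacy_options → Spec_select_privacy_level_py privacy_options (select_privacy_level_py privacy_options)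

-- ===== LEMMAS AND PROOFS =====

-- proof-only helpers: the rank of a string (4 = unranked) and the canonical string of a rank
def pvRankOf (s : String) : Int :=
  if s = "PUBLIC_TO_EVERYONE" then 0 else if s = "MUTUAL_FOLLOW_FRIENDS" then 1
  else if s = "FOLLOWER_OF_CREATOR" then 2 else if s = "SELF_ONLY" then 3 else 4

def pvKeyOf (r : Int) : String :=
  if r = 0 then "PUBLIC_TO_EVERYONE" else if r = 1 then "MUTUAL_FOLLOW_FRIENDS"
  else if r = 2 then "FOLLOWER_OF_CREATOR" else if r = 3 then "SELF_ONLY" else ""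

def pvMinRank (xs : List String) : Int := xs.foldr (fun s m => min (pvRankOf s) m) 4

theorem pvRanks_get? (s : String) :
    pvRanks.get? s = if pvRankOf s ≤ 3 then some (pvRankOf s) else none := by
  by_cases h0 : s = "PUBLIC_TO_EVERYONE"
  · subst h0; decide
  by_cases h1 : s = "MUTUAL_FOLLOW_FRIENDS"
  · subst h1; decide
  by_cases h2 : s = "FOLLOWER_OF_CREATOR"
  · subst h2; decide
  by_cases h3 : s = "SELF_ONLY"
  · subst h3; decide
  have hr : pvRankOf s = 4 := by simp [pvRankOf, h0, h1, h2, h3]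
  have h : pvRanks = PySem.Dict.mk
      [("PUBLIC_TO_EVERYONE", 0), ("MUTUAL_FOLLOW_FRIENDS", 1),
       ("FOLLOWER_OF_CREATOR", 2), ("SELF_ONLY", 3)] := by decide
  rw [h, hr]
  simp [PySem.Dict.get?_mk_cons, PySem.Dict.get?,
    Ne.symm h0, Ne.symm h1, Ne.symm h2, Ne.symm h3]

theorem pvRankOf_nonneg (s : String) : 0 ≤ pvRankOf s := by
  unfold pvRankOf; split_ifs <;> norm_num

theorem pvRankOf_le_four (s : String) : pvRankOf s ≤ 4 := by
  unfold pvRankOf; split_ifs <;> norm_num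

theorem pvKeyOf_rankOf (s : String) (h : pvRankOf s ≤ 3) : pvKeyOf (pvRankOf s) = s := by
  unfold pvRankOf at *
  split_ifs at h with h0 h1 h2 h3 <;> simp_all [pvKeyOf] <;> omega

theorem pvMinRank_nonneg (xs : List String) : 0 ≤ pvMinRank xs := by
  induction xs with
  | nil => norm_num [pvMinRank]
  | cons s t ih =>
    simp only [pvMinRank, List.foldr] at *
    exact le_min (pvRankOf_nonneg s) ih

theorem pvMinRank_le_four (xs : List String) : pvMinRank xs ≤ 4 := by
  induction xs with
  | nil => norm_num [pvMinRank]
  | cons s t ih =>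
    simp only [pvMinRank, List.foldr] at *
    exact le_trans (min_le_right _ _) ih

theorem pvMinRank_cons (s : String) (t : List String) :
    pvMinRank (s :: t) = min (pvRankOf s) (pvMinRank t) := rfl

theorem pvMinRank_le_iff (xs : List String) (k : Int) (hk : k < 4) :
    pvMinRank xs ≤ k ↔ ∃ s ∈ xs, pvRankOf s ≤ k := by
  induction xs with
  | nil => simp [pvMinRank]; omega
  | cons s t ih =>
    rw [pvMinRank_cons]
    simp only [List.mem_cons, min_le_iff, ih]
    constructor
    · rintro (h | ⟨u, hu, h⟩)
      · exact ⟨s, Or.inl rfl, h⟩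
      · exact ⟨u, Or.inr hu, h⟩
    · rintro ⟨u, (rfl | hu), h⟩
      · exact Or.inl h
      · exact Or.inr ⟨u, hu, h⟩

-- B's fold, started from a canonical ranked state
theorem pvFold_some (xs : List String) (r : Int) (hr0 : 0 ≤ r) (hr : r ≤ 3) :
    xs.foldl pvBStep (some (r, pvKeyOf r)) =
      some (min r (pvMinRank xs), pvKeyOf (min r (pvMinRank xs))) := by
  induction xs generalizing r with
  | nil =>
    have : min r (pvMinRank []) = r := by
      have : pvMinRank ([] : List String) = 4 := rfl
      omega
    simp [this]
  | cons s t ih =>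
    rw [pvMinRank_cons, List.foldl_cons]
    by_cases hs : pvRankOf s ≤ 3
    · have hkey := pvKeyOf_rankOf s hs
      have hstep : pvBStep (some (r, pvKeyOf r)) s =
          some (min r (pvRankOf s), pvKeyOf (min r (pvRankOf s))) := by
        simp only [pvBStep, pvRanks_get?, if_pos hs]
        by_cases hlt : pvRankOf s < r
        · simp [hlt, min_eq_right (le_of_lt hlt), hkey]
        · simp only [if_neg hlt]
          have : min r (pvRankOf s) = r := by omega
          simp [this]
      rw [hstep, ih _ (by have := pvRankOf_nonneg s; omega) (by omega)]
      congr 1 <;> rw [min_assoc]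
    · have hstep : pvBStep (some (r, pvKeyOf r)) s = some (r, pvKeyOf r) := by
        simp [pvBStep, pvRanks_get?, hs]
      have h4 : pvRankOf s = 4 := by have := pvRankOf_le_four s; omega
      have hm : min r (min (pvRankOf s) (pvMinRank t)) = min r (pvMinRank t) := by
        have := pvMinRank_le_four t; omega
      rw [hstep, ih r hr0 hr, hm]

theorem pvFold_none (xs : List String) :
    xs.foldl pvBStep none =
      if pvMinRank xs ≤ 3 then some (pvMinRank xs, pvKeyOf (pvMinRank xs)) else none := by
  induction xs with
  | nil => simp [pvMinRank]
  | cons s t ih =>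
    rw [pvMinRank_cons, List.foldl_cons]
    by_cases hs : pvRankOf s ≤ 3
    · have hstep : pvBStep none s = some (pvRankOf s, pvKeyOf (pvRankOf s)) := by
        rw [pvKeyOf_rankOf s hs]; simp [pvBStep, pvRanks_get?, hs]
      rw [hstep, pvFold_some t (pvRankOf s) (pvRankOf_nonneg s) hs]
      have : min (pvRankOf s) (pvMinRank t) ≤ 3 := by
        have := min_le_left (pvRankOf s) (pvMinRank t); omega
      rw [if_pos this]
    · have hstep : pvBStep none s = none := by simp [pvBStep, pvRanks_get?, hs]
      have h4 : pvRankOf s = 4 := by have := pvRankOf_le_four s; omega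
      have hm : min (pvRankOf s) (pvMinRank t) = pvMinRank t := by
        have := pvMinRank_le_four t; omega
      rw [hstep, ih, hm]

theorem pvMem_iff_rank (norm : List String) (k : Int) (hk0 : 0 ≤ k) (hk : k ≤ 3) :
    pvKeyOf k ∈ norm ↔ ∃ s ∈ norm, pvRankOf s = k := by
  constructor
  · intro h
    refine ⟨pvKeyOf k, h, ?_⟩
    interval_cases k <;> rfl
  · rintro ⟨s, hs, hrk⟩
    have : pvKeyOf k = s := by rw [← hrk]; exact pvKeyOf_rankOf s (by omega)
    rwa [this]

-- ===== VERDICT (by name: the statement is the Claim_ definition above) =====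
theorem select_privacy_level_py_spec : Claim_equal_select_privacy_level_py := by
  intro privacy_options _
  unfold Spec_select_privacy_level_py select_privacy_level_py select_privacy_level_py_alt
  set norm := pvNormalize privacy_options with hnorm
  by_cases hempty : norm.isEmpty
  · simp [hempty]
  · simp only [hempty, if_neg, Bool.false_eq_true, not_false_eq_true, if_false]
    rw [pvFold_none]
    set m := pvMinRank norm with hm
    have hm0 := pvMinRank_nonneg norm
    have hm4 := pvMinRank_le_four norm
    -- membership of each canonical candidate expressed through the minimum rank
    have hle : ∀ k : Int, 0 ≤ k → k < 4 → (m ≤ k ↔ ∃ s ∈ norm, pvRankOf s ≤ k) :=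
      fun k _ hk => pvMinRank_le_iff norm k hk
    simp only [pvPrefOrder]
    by_cases h0 : "PUBLIC_TO_EVERYONE" ∈ norm
    · have : m ≤ 0 := by
        rw [hle 0 le_rfl (by norm_num)]
        exact ⟨_, h0, by decide⟩
      have hm' : m = 0 := by omega
      simp [pvAFind, h0, hm', pvKeyOf]
    · by_cases h1 : "MUTUAL_FOLLOW_FRIENDS" ∈ norm
      · have hub : m ≤ 1 := by
          rw [hle 1 (by norm_num) (by norm_num)]
          exact ⟨_, h1, by decide⟩
        have hlb : ¬ m ≤ 0 := by
          rw [hle 0 le_rfl (by norm_num)]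
          rintro ⟨s, hs, hrs⟩
          have : pvRankOf s = 0 := by have := pvRankOf_nonneg s; omega
          exact h0 (((pvMem_iff_rank norm 0 le_rfl (by norm_num)).mpr ⟨s, hs, this⟩))
        have hm' : m = 1 := by omega
        simp [pvAFind, h0, h1, hm', pvKeyOf]
      · by_cases h2 : "FOLLOWER_OF_CREATOR" ∈ norm
        · have hub : m ≤ 2 := by
            rw [hle 2 (by norm_num) (by norm_num)]
            exact ⟨_, h2, by decide⟩
          have hlb : ¬ m ≤ 1 := by
            rw [hle 1 (by norm_num) (by norm_num)]
            rintro ⟨s, hs, hrs⟩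
            have hr0 := pvRankOf_nonneg s
            rcases (by omega : pvRankOf s = 0 ∨ pvRankOf s = 1) with h | h
            · exact h0 ((pvMem_iff_rank norm 0 le_rfl (by norm_num)).mpr ⟨s, hs, h⟩)
            · exact h1 ((pvMem_iff_rank norm 1 (by norm_num) (by norm_num)).mpr ⟨s, hs, h⟩)
          have hm' : m = 2 := by omega
          simp [pvAFind, h0, h1, h2, hm', pvKeyOf]
        · by_cases h3 : "SELF_ONLY" ∈ norm
          · have hub : m ≤ 3 := by
              rw [hle 3 (by norm_num) (by norm_num)]
              exact ⟨_, h3, by decide⟩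
            have hlb : ¬ m ≤ 2 := by
              rw [hle 2 (by norm_num) (by norm_num)]
              rintro ⟨s, hs, hrs⟩
              have hr0 := pvRankOf_nonneg s
              rcases (by omega : pvRankOf s = 0 ∨ pvRankOf s = 1 ∨ pvRankOf s = 2) with h | h | h
              · exact h0 ((pvMem_iff_rank norm 0 le_rfl (by norm_num)).mpr ⟨s, hs, h⟩)
              · exact h1 ((pvMem_iff_rank norm 1 (by norm_num) (by norm_num)).mpr ⟨s, hs, h⟩)
              · exact h2 ((pvMem_iff_rank norm 2 (by norm_num) (by norm_num)).mpr ⟨s, hs, h⟩)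
            have hm' : m = 3 := by omega
            simp [pvAFind, h0, h1, h2, h3, hm', pvKeyOf]
          · have hlb : ¬ m ≤ 3 := by
              rw [hle 3 (by norm_num) (by norm_num)]
              rintro ⟨s, hs, hrs⟩
              have hr0 := pvRankOf_nonneg s
              rcases (by omega : pvRankOf s = 0 ∨ pvRankOf s = 1 ∨ pvRankOf s = 2 ∨ pvRankOf s = 3) with h | h | h | h
              · exact h0 ((pvMem_iff_rank norm 0 le_rfl (by norm_num)).mpr ⟨s, hs, h⟩)
              · exact h1 ((pvMem_iff_rank norm 1 (by norm_num) (by norm_num)).mpr ⟨s, hs, h⟩)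
              · exact h2 ((pvMem_iff_rank norm 2 (by norm_num) (by norm_num)).mpr ⟨s, hs, h⟩)
              · exact h3 ((pvMem_iff_rank norm 3 (by norm_num) (by norm_num)).mpr ⟨s, hs, h⟩)
            simp [pvAFind, h0, h1, h2, h3, hlb, List.headD_eq_head?_getD]
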